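-- pv_equiv track=rewrite | github.com/lasksafj/LeetCode | 3030-find-the-grid-of-region-average/3030-find-the-grid-of-region-average.py | resultGrid
-- ===== SOURCE A (Python) =====
-- from typing import List
--
-- def resultGrid(image: List[List[int]], threshold: int) -> List[List[int]]:
--     M,N = len(image),len(image[0])
--     res = [[[] for _ in range(N)] for _ in range(M)]
--
--     for i in range(M-2):
--         for j in range(N-2):
--             s = 0
--             is_region = True
--             for ii in range(i,i+3):
--                 for jj in range(j,j+3):
--                     s += image[ii][jj]
--                     if ii < i+2 and abs(image[ii][jj]-image[ii+1][jj]) > threshold \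
--                     or jj < j+2 and abs(image[ii][jj]-image[ii][jj+1]) > threshold:
--                         is_region = False
--             if is_region:
--                 for ii in range(i,i+3):
--                     for jj in range(j,j+3):
--                         res[ii][jj].append(s//9)
--     for i in range(M):
--         for j in range(N):
--             if res[i][j]:
--                 res[i][j] = sum(res[i][j])//(len(res[i][j]))
--             else:
--                 res[i][j] = image[i][j]
--
--     return res
-- ===== SOURCE B (Python) =====
-- from typing import List
--
-- def resultGrid(image: List[List[int]], threshold: int) -> List[List[int]]:
--     # Gather formulation: precompute a table of candidate region averages (one entry
--     # per 3x3 corner, None if the region is not uniform), then each output cell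
--     # collects the <=9 candidates covering it -- no scatter into a mutable grid.
--     M, N = len(image), len(image[0])
--
--     def valid(x, y):
--         # corner (x,y): all adjacent pairs inside the 3x3 block within threshold
--         return all(abs(image[a][b] - image[a][b + 1]) <= threshold
--                    for a in range(x, x + 3) for b in range(y, y + 2)) \
--            and all(abs(image[a][b] - image[a + 1][b]) <= threshold
--                    for a in range(x, x + 2) for b in range(y, y + 3))
--
--     def regionsum(x, y):
--         return sum(image[a][b] for a in range(x, x + 3) for b in range(y, y + 3))
--
--     cands = [[regionsum(x, y) // 9 if valid(x, y) else None
--               for y in range(N - 2)] for x in range(M - 2)]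
--
--     out = []
--     for i in range(M):
--         row = []
--         for j in range(N):
--             vals = [v for x in range(max(i - 2, 0), min(i, M - 3) + 1)
--                       for y in range(max(j - 2, 0), min(j, N - 3) + 1)
--                       if (v := cands[x][y]) is not None]
--             row.append(sum(vals) // len(vals) if vals else image[i][j])
--         out.append(row)
--     return out
-- ===== Notes on version B (the rewrite author's own statement) =====
-- stated objective: alternative
-- what changed: A scatters each valid 3x3 region's s//9 into a mutable grid of per-cell lists and then averages them; B first precomputes a read-only table with one Optional candidate average per region corner (validity tested directly over the adjacent-pair edges) and then fills each output cell by gathering the at most 9 clamped candidate corners covering it.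
import Mathlib
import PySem

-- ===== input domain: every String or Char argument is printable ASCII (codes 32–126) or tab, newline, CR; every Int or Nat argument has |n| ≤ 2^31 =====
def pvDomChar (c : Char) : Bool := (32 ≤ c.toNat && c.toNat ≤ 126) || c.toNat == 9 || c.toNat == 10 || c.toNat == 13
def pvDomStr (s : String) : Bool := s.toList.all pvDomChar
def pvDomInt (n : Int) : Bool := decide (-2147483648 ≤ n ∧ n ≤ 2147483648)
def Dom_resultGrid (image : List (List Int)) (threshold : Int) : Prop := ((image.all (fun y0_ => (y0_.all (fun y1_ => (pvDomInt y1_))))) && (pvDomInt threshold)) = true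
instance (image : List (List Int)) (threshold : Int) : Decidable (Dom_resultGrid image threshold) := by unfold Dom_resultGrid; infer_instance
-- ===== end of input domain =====

-- B replaces A's scatter of region averages into a mutable grid by a per-cell gather
-- over the ≤ 9 candidate region corners covering each cell (objective: alternative).

-- ===== PORT A =====
-- image[a][b] for in-range nonnegative indices (Pre_ keeps every access in range)
def pvGet2 (image : List (List Int)) (a b : Int) : Int :=
  PySem.List.pyGetD (PySem.List.pyGetD image a []) b 0

-- res[ii][jj].append(v) (exact for in-range nonnegative ii, jj)
def pvUpd2 (res : List (List (List Int))) (ii jj : Int) (v : Int) : List (List (List Int)) :=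
  PySem.List.pySetD res ii
    (PySem.List.pySetD (PySem.List.pyGetD res ii []) jj
      (PySem.List.pyGetD (PySem.List.pyGetD res ii []) jj [] ++ [v]))

def resultGrid (image : List (List Int)) (threshold : Int) : List (List Int) :=
  let M : Int := image.length
  let N : Int := (PySem.List.pyGetD image 0 []).length
  let res0 : List (List (List Int)) :=
    (PySem.List.pyRange 0 M 1).map (fun _ => (PySem.List.pyRange 0 N 1).map (fun _ => ([] : List Int)))
  let res :=
    (PySem.List.pyRange 0 (M - 2) 1).foldl (fun res i =>
      (PySem.List.pyRange 0 (N - 2) 1).foldl (fun res j =>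
        let p : Int × Bool :=
          (PySem.List.pyRange i (i + 3) 1).foldl (fun p ii =>
            (PySem.List.pyRange j (j + 3) 1).foldl (fun p jj =>
              let s := p.1 + pvGet2 image ii jj
              if (ii < i + 2 ∧ |pvGet2 image ii jj - pvGet2 image (ii + 1) jj| > threshold)
                 ∨ (jj < j + 2 ∧ |pvGet2 image ii jj - pvGet2 image ii (jj + 1)| > threshold)
              then (s, false) else (s, p.2)) p) (0, true)
        if p.2 then
          (PySem.List.pyRange i (i + 3) 1).foldl (fun res ii =>
            (PySem.List.pyRange j (j + 3) 1).foldl (fun res jj =>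
              pvUpd2 res ii jj (PySem.Int.floordiv p.1 9)) res) res
        else res) res) res0
  (PySem.List.pyRange 0 M 1).map (fun i =>
    (PySem.List.pyRange 0 N 1).map (fun j =>
      let cell := PySem.List.pyGetD (PySem.List.pyGetD res i []) j []
      if cell ≠ [] then PySem.Int.floordiv cell.sum (cell.length : Int) else pvGet2 image i j))

-- ===== PORT B =====
def pvValid (image : List (List Int)) (threshold x y : Int) : Bool :=
  ((PySem.List.pyRange x (x + 3) 1).all fun a =>
    (PySem.List.pyRange y (y + 2) 1).all fun b =>
      decide (|pvGet2 image a b - pvGet2 image a (b + 1)| ≤ threshold))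
  &&
  ((PySem.List.pyRange x (x + 2) 1).all fun a =>
    (PySem.List.pyRange y (y + 3) 1).all fun b =>
      decide (|pvGet2 image a b - pvGet2 image (a + 1) b| ≤ threshold))

def pvRegionSum (image : List (List Int)) (x y : Int) : Int :=
  ((PySem.List.pyRange x (x + 3) 1).flatMap (fun a =>
    (PySem.List.pyRange y (y + 3) 1).map (fun b => pvGet2 image a b))).sum

def resultGrid_alt (image : List (List Int)) (threshold : Int) : List (List Int) :=
  let M : Int := image.length
  let N : Int := (PySem.List.pyGetD image 0 []).length
  let cands : List (List (Option Int)) :=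
    (PySem.List.pyRange 0 (M - 2) 1).map (fun x =>
      (PySem.List.pyRange 0 (N - 2) 1).map (fun y =>
        if pvValid image threshold x y
        then some (PySem.Int.floordiv (pvRegionSum image x y) 9) else none))
  (PySem.List.pyRange 0 M 1).map (fun i =>
    (PySem.List.pyRange 0 N 1).map (fun j =>
      let vals : List Int :=
        (PySem.List.pyRange (max (i - 2) 0) (min i (M - 3) + 1) 1).flatMap (fun x =>
          (PySem.List.pyRange (max (j - 2) 0) (min j (N - 3) + 1) 1).flatMap (fun y =>
            match PySem.List.pyGetD (PySem.List.pyGetD cands x []) y none with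
            | some v => [v]
            | none => []))
      if vals ≠ [] then PySem.Int.floordiv vals.sum (vals.length : Int) else pvGet2 image i j))

-- ===== PRECONDITION & SPEC =====
-- Pre_ is exactly where the Python A returns: a nonempty image whose rows all have at
-- least len(image[0]) columns (a shorter row raises IndexError in A's final pass).
def Pre_resultGrid (image : List (List Int)) (threshold : Int) : Prop :=
  image ≠ [] ∧ ∀ r ∈ image, (image.headD []).length ≤ r.length
instance (image : List (List Int)) (threshold : Int) : Decidable (Pre_resultGrid image threshold) := by unfold Pre_resultGrid; infer_instance

def pvWitness_resultGrid : List (List Int) × Int := ([[1, 2], [3, 4]], 5)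

def Spec_resultGrid (image : List (List Int)) (threshold : Int) (out : List (List Int)) : Prop := out = resultGrid_alt image threshold
instance (image : List (List Int)) (threshold : Int) (out : List (List Int)) : Decidable (Spec_resultGrid image threshold out) := by unfold Spec_resultGrid; infer_instance

-- ===== CLAIM (what is proved, stated in full; the proofs are below) =====
def Claim_equal_resultGrid : Prop := ∀ (image : List (List Int)) (threshold : Int), Dom_resultGrid image threshold → Pre_resultGrid image threshold → Spec_resultGrid image threshold (resultGrid image threshold)

-- ===== LEMMAS AND PROOFS =====

-- cell access / shape of the mutable grid
def pvCell (res : List (List (List Int))) (i j : Int) : List Int :=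
  PySem.List.pyGetD (PySem.List.pyGetD res i []) j []

def pvShape (res : List (List (List Int))) (M N : Int) : Prop :=
  (res.length : Int) = M ∧ ∀ r ∈ res, (r.length : Int) = N

-- the flattened scatter stream of A: one ((cell position), value) pair per covered cell
def pvCellsOf (x y v : Int) : List ((Int × Int) × Int) :=
  (PySem.List.pyRange x (x + 3) 1).flatMap (fun ii =>
    (PySem.List.pyRange y (y + 3) 1).map (fun jj => ((ii, jj), v)))

def pvBig (image : List (List Int)) (threshold M N : Int) : List ((Int × Int) × Int) :=
  ((PySem.List.pyRange 0 (M - 2) 1).flatMap (fun x =>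
    (PySem.List.pyRange 0 (N - 2) 1).map (Prod.mk x))).flatMap (fun c =>
      if pvValid image threshold c.1 c.2
      then pvCellsOf c.1 c.2 (PySem.Int.floordiv (pvRegionSum image c.1 c.2) 9) else [])

def pvUpdStep (r : List (List (List Int))) (q : (Int × Int) × Int) : List (List (List Int)) :=
  pvUpd2 r q.1.1 q.1.2 q.2

lemma pv_sum_flatMap {α : Type} (l : List α) (g : α → List Int) :
    (l.flatMap g).sum = (l.map (fun x => (g x).sum)).sum := by
  induction l with
  | nil => simp
  | cons x xs ih => simp [List.flatMap_cons, ih]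

lemma pv_flatMap_if {α β : Type} (l : List α) (p : α → Bool) (g : α → List β) :
    (l.flatMap (fun x => if p x then g x else [])) = (l.filter p).flatMap g := by
  induction l with
  | nil => simp
  | cons x xs ih =>
    by_cases h : p x <;> simp [h, ih]

lemma pv_flatMap_const_nil {α β : Type} (l : List α) :
    (l.flatMap (fun _ => ([] : List β))) = [] := by simp

lemma pv_filter_pyRange_interval (a b c d : Int) :
    (PySem.List.pyRange a b 1).filter (fun x => decide (c ≤ x ∧ x ≤ d))
      = PySem.List.pyRange (max a c) (min b (d + 1)) 1 := by
  apply List.Perm.eq_of_pairwise (le := (· < ·))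
  · intro x y _ _ h1 h2; omega
  · exact (PySem.List.pairwise_lt_pyRange_one a b).filter _
  · exact PySem.List.pairwise_lt_pyRange_one _ _
  · apply List.perm_of_nodup_nodup_toFinset_eq
    · exact (PySem.List.nodup_pyRange_one a b).filter _
    · exact PySem.List.nodup_pyRange_one _ _
    · ext x
      simp [PySem.List.mem_pyRange_one]
      omega

lemma pv_filter_pyRange_eq (a b t : Int) :
    (PySem.List.pyRange a b 1).filter (fun x => decide (x = t))
      = if a ≤ t ∧ t < b then [t] else [] := by
  rw [List.filter_congr (fun x _ => by simp [eq_comm, le_antisymm_iff] : ∀ x ∈ PySem.List.pyRange a b 1, _ = (fun x => decide (t ≤ x ∧ x ≤ t)) x)]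
  rw [pv_filter_pyRange_interval]
  split
  · next h => rw [show max a t = t by omega, show min b (t+1) = t + 1 by omega, PySem.List.pyRange_one_singleton]
  · next h =>
    rcases max_choice a t with h1 | h1 <;> rcases min_choice b (t+1) with h2 | h2 <;>
      rw [h1, h2, PySem.List.pyRange_one_eq_nil (by omega)]

lemma pv_foldl_pair_add_and {α : Type} (l : List α) (f : α → Int) (g : α → Bool) (s : Int) (b : Bool) :
    l.foldl (fun p x => (p.1 + f x, p.2 && g x)) (s, b) = (s + (l.map f).sum, b && l.all g) := by
  induction l generalizing s b with
  | nil => simp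
  | cons x xs ih => simp [ih, add_assoc, Bool.and_assoc]

-- A's inner 3×3 accumulation computes the region sum and B's validity predicate
lemma pv_pair_fold (image : List (List Int)) (threshold i j : Int) :
    (PySem.List.pyRange i (i + 3) 1).foldl (fun p ii =>
      (PySem.List.pyRange j (j + 3) 1).foldl (fun p jj =>
        let s := p.1 + pvGet2 image ii jj
        if (ii < i + 2 ∧ |pvGet2 image ii jj - pvGet2 image (ii + 1) jj| > threshold)
           ∨ (jj < j + 2 ∧ |pvGet2 image ii jj - pvGet2 image ii (jj + 1)| > threshold)
        then (s, false) else (s, p.2)) p) ((0 : Int), true)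
    = (pvRegionSum image i j, pvValid image threshold i j) := by
  have hinner : ∀ (ii : Int) (p : Int × Bool),
      (PySem.List.pyRange j (j + 3) 1).foldl (fun p jj =>
        let s := p.1 + pvGet2 image ii jj
        if (ii < i + 2 ∧ |pvGet2 image ii jj - pvGet2 image (ii + 1) jj| > threshold)
           ∨ (jj < j + 2 ∧ |pvGet2 image ii jj - pvGet2 image ii (jj + 1)| > threshold)
        then (s, false) else (s, p.2)) p
      = (p.1 + ((PySem.List.pyRange j (j + 3) 1).map (fun jj => pvGet2 image ii jj)).sum,
         p.2 && (PySem.List.pyRange j (j + 3) 1).all (fun jj =>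
           !decide ((ii < i + 2 ∧ |pvGet2 image ii jj - pvGet2 image (ii + 1) jj| > threshold)
             ∨ (jj < j + 2 ∧ |pvGet2 image ii jj - pvGet2 image ii (jj + 1)| > threshold)))) := by
    intro ii p
    rw [PySem.List.foldl_congr_mem _ _
      (fun p jj => (p.1 + pvGet2 image ii jj, p.2 &&
        !decide ((ii < i + 2 ∧ |pvGet2 image ii jj - pvGet2 image (ii + 1) jj| > threshold)
          ∨ (jj < j + 2 ∧ |pvGet2 image ii jj - pvGet2 image ii (jj + 1)| > threshold)))) _
      (by intro acc x hx; by_cases h : (ii < i + 2 ∧ |pvGet2 image ii x - pvGet2 image (ii + 1) x| > threshold)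
             ∨ (x < j + 2 ∧ |pvGet2 image ii x - pvGet2 image ii (x + 1)| > threshold) <;> simp [h])]
    exact pv_foldl_pair_add_and _ _ _ p.1 p.2
  rw [PySem.List.foldl_congr_mem _ _
    (fun (p : Int × Bool) ii => (p.1 + ((PySem.List.pyRange j (j + 3) 1).map (fun jj => pvGet2 image ii jj)).sum,
      p.2 && (PySem.List.pyRange j (j + 3) 1).all (fun jj =>
        !decide ((ii < i + 2 ∧ |pvGet2 image ii jj - pvGet2 image (ii + 1) jj| > threshold)
          ∨ (jj < j + 2 ∧ |pvGet2 image ii jj - pvGet2 image ii (jj + 1)| > threshold))))) _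
    (by intro acc x hx; exact hinner x acc)]
  rw [pv_foldl_pair_add_and]
  rw [Prod.mk.injEq]
  constructor
  · rw [pvRegionSum, pv_sum_flatMap]; simp
  · rw [Bool.true_and]
    rw [Bool.eq_iff_iff]
    simp only [pvValid, List.all_eq_true, PySem.List.mem_pyRange_one, Bool.and_eq_true,
      Bool.not_eq_eq_eq_not, Bool.not_true, decide_eq_false_iff_not, decide_eq_true_eq, not_or,
      not_and, not_lt]
    constructor
    · intro h
      refine ⟨fun a ha b hb => ?_, fun a ha b hb => ?_⟩
      · exact (h a ⟨ha.1, by omega⟩ b ⟨hb.1, by omega⟩).2 (by omega)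
      · exact (h a ⟨ha.1, by omega⟩ b ⟨hb.1, by omega⟩).1 (by omega)
    · intro h a ha b hb
      exact ⟨fun h2 => h.2 a ⟨ha.1, by omega⟩ b hb, fun h2 => h.1 a ha b ⟨hb.1, by omega⟩⟩

lemma pv_upd2_shape (res : List (List (List Int))) (M N a b v : Int)
    (h : pvShape res M N) (ha : 0 ≤ a) (ha2 : a < M) (hb : 0 ≤ b) (hb2 : b < N) :
    pvShape (pvUpd2 res a b v) M N := by
  obtain ⟨h1, h2⟩ := h
  rw [pvUpd2, PySem.List.pySetD_of_nonneg _ _ ha, PySem.List.pySetD_of_nonneg _ _ hb]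
  constructor
  · simpa using h1
  · intro r hr
    rcases List.mem_or_eq_of_mem_set hr with hr | hr
    · exact h2 r hr
    · subst hr
      rw [List.length_set]
      apply h2
      apply PySem.List.pyGetD_mem
      constructor <;> omega

lemma pv_upd2_cell (res : List (List (List Int))) (M N a b v i j : Int)
    (h : pvShape res M N) (ha : 0 ≤ a) (ha2 : a < M) (hb : 0 ≤ b) (hb2 : b < N)
    (hi : 0 ≤ i) (hi2 : i < M) (hj : 0 ≤ j) (hj2 : j < N) :
    pvCell (pvUpd2 res a b v) i j
      = if a = i ∧ b = j then pvCell res i j ++ [v] else pvCell res i j := by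
  obtain ⟨h1, h2⟩ := h
  have hrowlen : ((PySem.List.pyGetD res a []).length : Int) = N :=
    h2 _ (PySem.List.pyGetD_mem res [] ⟨by omega, by omega⟩)
  have hlena : a.toNat < res.length := by omega
  have hlenb : b.toNat < (PySem.List.pyGetD res a []).length := by omega
  rw [pvUpd2, pvCell, pvCell]
  rw [← Int.toNat_of_nonneg ha, ← Int.toNat_of_nonneg hb,
      ← Int.toNat_of_nonneg hi, ← Int.toNat_of_nonneg hj]
  rw [PySem.List.pyGetD_pySetD_natCast _ _ _ _ _ hlena]
  by_cases hai : i.toNat = a.toNat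
  · rw [if_pos hai, hai]
    have hlenb' : b.toNat < (PySem.List.pyGetD res ((a.toNat : Nat) : Int) []).length := by
      rw [Int.toNat_of_nonneg ha]; exact hlenb
    rw [PySem.List.pyGetD_pySetD_natCast _ _ _ _ _ hlenb']
    by_cases hbj : j.toNat = b.toNat
    · rw [if_pos hbj, if_pos (by omega), hbj]
    · rw [if_neg hbj, if_neg (by omega)]
  · rw [if_neg hai, if_neg (by omega)]

lemma pv_scatter (M N : Int) (pairs : List ((Int × Int) × Int))
    (res : List (List (List Int))) (h : pvShape res M N)
    (hp : ∀ q ∈ pairs, 0 ≤ q.1.1 ∧ q.1.1 < M ∧ 0 ≤ q.1.2 ∧ q.1.2 < N)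
    (i j : Int) (hi : 0 ≤ i) (hi2 : i < M) (hj : 0 ≤ j) (hj2 : j < N) :
    pvCell (pairs.foldl pvUpdStep res) i j
      = pvCell res i j ++ (pairs.filter (fun q => decide (q.1 = (i, j)))).map (·.2) := by
  induction pairs generalizing res with
  | nil => simp
  | cons q qs ih =>
    obtain ⟨hq1, hq2, hq3, hq4⟩ := hp q List.mem_cons_self
    rw [List.foldl_cons, pvUpdStep]
    rw [ih _ (pv_upd2_shape res M N q.1.1 q.1.2 q.2 h hq1 hq2 hq3 hq4)
        (fun r hr => hp r (List.mem_cons_of_mem _ hr))]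
    show pvCell (pvUpd2 res q.1.1 q.1.2 q.2) i j ++ _ = _
    rw [pv_upd2_cell res M N q.1.1 q.1.2 q.2 i j h hq1 hq2 hq3 hq4 hi hi2 hj hj2]
    by_cases hcov : q.1.1 = i ∧ q.1.2 = j
    · rw [if_pos hcov, List.filter_cons_of_pos (by simp [Prod.ext_iff]; omega)]
      simp
    · rw [if_neg hcov, List.filter_cons_of_neg (by simp [Prod.ext_iff]; omega)]

-- the filtered scatter stream at cell (i, j) is exactly B's per-cell gather list
lemma pv_gather_1d (a b c d : Int) (g : Int → List Int) :
    (PySem.List.pyRange a b 1).flatMap (fun y => if c ≤ y ∧ y ≤ d then g y else [])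
      = (PySem.List.pyRange (max a c) (min b (d + 1)) 1).flatMap g := by
  rw [show (fun y => if c ≤ y ∧ y ≤ d then g y else [])
      = (fun y => if (fun z => decide (c ≤ z ∧ z ≤ d)) y then g y else []) from
    funext fun y => by simp]
  rw [pv_flatMap_if, pv_filter_pyRange_interval]

-- the filtered scatter stream at cell (i, j) is exactly B's per-cell gather list
lemma pv_big_filter (image : List (List Int)) (threshold M N i j : Int) :
    ((pvBig image threshold M N).filter (fun q => decide (q.1 = (i, j)))).map (·.2)
      = (PySem.List.pyRange (max (i - 2) 0) (min i (M - 3) + 1) 1).flatMap (fun x =>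
          (PySem.List.pyRange (max (j - 2) 0) (min j (N - 3) + 1) 1).flatMap (fun y =>
            if pvValid image threshold x y
            then [PySem.Int.floordiv (pvRegionSum image x y) 9] else [])) := by
  rw [pvBig, List.filter_flatMap, List.map_flatMap]
  simp only [List.flatMap_assoc, List.flatMap_map]
  have hcell : ∀ x y v : Int,
      ((pvCellsOf x y v).filter (fun q => decide (q.1 = (i, j)))).map (·.2)
        = if i - 2 ≤ x ∧ x ≤ i then (if j - 2 ≤ y ∧ y ≤ j then [v] else []) else [] := by
    intro x y v
    rw [pvCellsOf, List.filter_flatMap, List.map_flatMap]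
    have hinner : ∀ ii : Int,
        (((PySem.List.pyRange y (y + 3) 1).map (fun jj => ((ii, jj), v))).filter
            (fun q => decide (q.1 = (i, j)))).map (·.2)
          = if ii = i then (if j - 2 ≤ y ∧ y ≤ j then [v] else []) else [] := by
      intro ii
      rw [List.filter_map]
      by_cases hii : ii = i
      · subst hii
        rw [List.filter_congr (fun x _ => by simp [Prod.ext_iff] :
            ∀ x ∈ PySem.List.pyRange y (y + 3) 1,
              ((fun q => decide (q.1 = (ii, j))) ∘ (fun jj => ((ii, jj), v))) x = (fun x => decide (x = j)) x)]
        rw [pv_filter_pyRange_eq]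
        rw [if_pos rfl]
        by_cases hjy : y ≤ j ∧ j < y + 3
        · rw [if_pos hjy, if_pos (show j - 2 ≤ y ∧ y ≤ j by omega)]; simp
        · rw [if_neg hjy, if_neg (show ¬(j - 2 ≤ y ∧ y ≤ j) by omega)]; simp
      · rw [List.filter_congr (fun x _ => by simp [Prod.ext_iff, hii] :
            ∀ x ∈ PySem.List.pyRange y (y + 3) 1,
              ((fun q => decide (q.1 = (i, j))) ∘ (fun jj => ((ii, jj), v))) x = (fun _ => false) x)]
        rw [if_neg hii]
        simp
    rw [List.flatMap_congr (fun ii _ => hinner ii)]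
    rw [show (fun ii => if ii = i then (if j - 2 ≤ y ∧ y ≤ j then [v] else []) else ([] : List Int))
        = (fun ii => if decide (ii = i) = true then (if j - 2 ≤ y ∧ y ≤ j then [v] else []) else []) from by
      funext ii; simp]
    rw [pv_flatMap_if, pv_filter_pyRange_eq]
    by_cases hx : x ≤ i ∧ i < x + 3
    · rw [if_pos hx, if_pos (show i - 2 ≤ x ∧ x ≤ i by omega)]; simp
    · rw [if_neg hx, if_neg (show ¬(i - 2 ≤ x ∧ x ≤ i) by omega)]; simp
  have step1 : ∀ x y : Int,
      ((if pvValid image threshold x y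
        then pvCellsOf x y (PySem.Int.floordiv (pvRegionSum image x y) 9) else []).filter
          (fun q => decide (q.1 = (i, j)))).map (·.2)
      = if i - 2 ≤ x ∧ x ≤ i then (if j - 2 ≤ y ∧ y ≤ j then
          (if pvValid image threshold x y
           then [PySem.Int.floordiv (pvRegionSum image x y) 9] else []) else []) else [] := by
    intro x y
    by_cases hv : pvValid image threshold x y
    · rw [if_pos hv, hcell]
      by_cases h1 : i - 2 ≤ x ∧ x ≤ i <;> by_cases h2 : j - 2 ≤ y ∧ y ≤ j <;>
        simp [h1, h2, hv]
    · by_cases h1 : i - 2 ≤ x ∧ x ≤ i <;> by_cases h2 : j - 2 ≤ y ∧ y ≤ j <;>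
        simp [h1, h2, hv]
  rw [List.flatMap_congr (fun x _ => List.flatMap_congr (fun y _ => step1 x y))]
  have step2 : ∀ x : Int,
      (PySem.List.pyRange 0 (N - 2) 1).flatMap (fun y =>
        if i - 2 ≤ x ∧ x ≤ i then (if j - 2 ≤ y ∧ y ≤ j then
          (if pvValid image threshold x y
           then [PySem.Int.floordiv (pvRegionSum image x y) 9] else []) else []) else [])
      = if i - 2 ≤ x ∧ x ≤ i then
          (PySem.List.pyRange 0 (N - 2) 1).flatMap (fun y => if j - 2 ≤ y ∧ y ≤ j then
            (if pvValid image threshold x y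
             then [PySem.Int.floordiv (pvRegionSum image x y) 9] else []) else [])
        else [] := by
    intro x
    by_cases h1 : i - 2 ≤ x ∧ x ≤ i
    · rw [if_pos h1]
      exact List.flatMap_congr (fun y _ => if_pos h1)
    · rw [if_neg h1]
      rw [List.flatMap_congr (fun y _ => if_neg h1)]
      exact pv_flatMap_const_nil _
  rw [List.flatMap_congr (fun x _ => step2 x)]
  rw [pv_gather_1d]
  rw [show max 0 (i - 2) = max (i - 2) 0 by omega,
      show min (M - 2) (i + 1) = min i (M - 3) + 1 by omega]
  apply List.flatMap_congr
  intro x _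
  rw [pv_gather_1d]
  rw [show max 0 (j - 2) = max (j - 2) 0 by omega,
      show min (N - 2) (j + 1) = min j (N - 3) + 1 by omega]

lemma pv_big_bounds (image : List (List Int)) (threshold M N : Int) :
    ∀ q ∈ pvBig image threshold M N, 0 ≤ q.1.1 ∧ q.1.1 < M ∧ 0 ≤ q.1.2 ∧ q.1.2 < N := by
  intro q hq
  rw [pvBig] at hq
  rcases List.mem_flatMap.mp hq with ⟨c, hc, hq2⟩
  simp only [List.mem_flatMap, List.mem_map, PySem.List.mem_pyRange_one] at hc
  obtain ⟨x, hx, y, hy, hxy⟩ := hc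
  subst hxy
  split at hq2
  · rw [pvCellsOf] at hq2
    simp only [List.mem_flatMap, List.mem_map, PySem.List.mem_pyRange_one] at hq2
    obtain ⟨ii, hii, jj, hjj, hq⟩ := hq2
    subst hq
    simp only []
    refine ⟨by omega, by omega, by omega, by omega⟩
  · simp at hq2

-- A's scatter loop is the fold of the flattened stream
lemma pv_loop_eq_big (image : List (List Int)) (threshold M N : Int)
    (res0 : List (List (List Int))) :
    ((PySem.List.pyRange 0 (M - 2) 1).foldl (fun res i =>
      (PySem.List.pyRange 0 (N - 2) 1).foldl (fun res j =>
        let p : Int × Bool :=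
          (PySem.List.pyRange i (i + 3) 1).foldl (fun p ii =>
            (PySem.List.pyRange j (j + 3) 1).foldl (fun p jj =>
              let s := p.1 + pvGet2 image ii jj
              if (ii < i + 2 ∧ |pvGet2 image ii jj - pvGet2 image (ii + 1) jj| > threshold)
                 ∨ (jj < j + 2 ∧ |pvGet2 image ii jj - pvGet2 image ii (jj + 1)| > threshold)
              then (s, false) else (s, p.2)) p) (0, true)
        if p.2 then
          (PySem.List.pyRange i (i + 3) 1).foldl (fun res ii =>
            (PySem.List.pyRange j (j + 3) 1).foldl (fun res jj =>
              pvUpd2 res ii jj (PySem.Int.floordiv p.1 9)) res) res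
        else res) res) res0)
    = (pvBig image threshold M N).foldl pvUpdStep res0 := by
  rw [pvBig, List.foldl_flatMap, List.foldl_flatMap]
  apply PySem.List.foldl_congr_mem
  intro acc x _
  rw [List.foldl_map]
  apply PySem.List.foldl_congr_mem
  intro acc2 y _
  simp only [pv_pair_fold]
  by_cases h : pvValid image threshold x y
  · simp only [h, if_pos]
    rw [pvCellsOf, List.foldl_flatMap]
    apply PySem.List.foldl_congr_mem
    intro acc3 ii _
    rw [List.foldl_map]
    rfl
  · simp only [h, if_neg, Bool.false_eq_true, not_false_iff]
    simp

-- ===== VERDICT (by name: the statement is the Claim_ definition above) =====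
theorem resultGrid_spec : Claim_equal_resultGrid := by
  intro image threshold _hdom _hpre
  show resultGrid image threshold = resultGrid_alt image threshold
  simp only [resultGrid, resultGrid_alt]
  apply List.map_congr_left
  intro i hi
  apply List.map_congr_left
  intro j hj
  rw [PySem.List.mem_pyRange_one] at hi hj
  rw [pv_loop_eq_big]
  rw [← pvCell]
  rw [pv_scatter ((image.length : Int)) (((PySem.List.pyGetD image 0 []).length : Int)) _ _
    (by
      constructor
      · simp
      · intro r hr
        rcases List.mem_map.mp hr with ⟨_, _, rfl⟩
        simp)
    (pv_big_bounds image threshold _ _) i j hi.1 hi.2 hj.1 hj.2]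
  rw [show pvCell ((PySem.List.pyRange 0 (image.length : Int) 1).map
        (fun _ => (PySem.List.pyRange 0 ((PySem.List.pyGetD image 0 []).length : Int) 1).map
          (fun _ => ([] : List Int)))) i j = [] from by
    rw [pvCell, PySem.List.pyGetD_map_pyRange_of_nonneg _ _ _ _ hi.1 hi.2,
        PySem.List.pyGetD_map_pyRange_of_nonneg _ _ _ _ hj.1 hj.2]]
  rw [List.nil_append]
  rw [pv_big_filter]
  have hval : ∀ x ∈ PySem.List.pyRange (max (i - 2) 0) (min i ((image.length : Int) - 3) + 1) 1,
      ∀ y ∈ PySem.List.pyRange (max (j - 2) 0)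
        (min j (((PySem.List.pyGetD image 0 []).length : Int) - 3) + 1) 1,
      (if pvValid image threshold x y
       then [PySem.Int.floordiv (pvRegionSum image x y) 9] else ([] : List Int))
      = match PySem.List.pyGetD (PySem.List.pyGetD
            ((PySem.List.pyRange 0 ((image.length : Int) - 2) 1).map (fun x =>
              (PySem.List.pyRange 0 (((PySem.List.pyGetD image 0 []).length : Int) - 2) 1).map (fun y =>
                if pvValid image threshold x y
                then some (PySem.Int.floordiv (pvRegionSum image x y) 9) else none))) x []) y none with
        | some v => [v]
        | none => [] := by
    intro x hx y hy
    rw [PySem.List.mem_pyRange_one] at hx hy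
    rw [PySem.List.pyGetD_map_pyRange_of_nonneg _ _ _ _ (by omega) (by omega),
        PySem.List.pyGetD_map_pyRange_of_nonneg _ _ _ _ (by omega) (by omega)]
    by_cases hv : pvValid image threshold x y <;> simp [hv]
  rw [List.flatMap_congr (fun x hx => List.flatMap_congr (fun y hy => hval x hx y hy))]
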